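-- pv_equiv track=rewrite | github.com/XiaotongShen/Data-Structure-and-Algorithm | Zuo/Basic/Class02/Code03_KM.py | km
-- ===== SOURCE A (Python) =====
-- def km(arr: list, k: int, m: int):
--     """ 数组中只有一种数出现了k次，其他所有数均出现了m次，请找出出现了k次的数(精简版) """
--     ast = [0] * 32
--     for num in arr:
--         for i in range(32):
--             ast[i] += (num >> i) & 1
--     ans = 0
--     for i in range(32):
--         ast[i] %= m
--         if ast[i] != 0:
--             ans |= 1 << i
--     return ans
-- ===== SOURCE B (Python) =====
-- def km(arr: list, k: int, m: int):
--     """ Find the number appearing k times where every other number appears m times. """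
--     def go(nums, depth):
--         if depth == 32:
--             return 0
--         c = 0
--         for x in nums:
--             c += x & 1
--         rest = go([x >> 1 for x in nums], depth + 1)
--         bit = 1 if c % m != 0 else 0
--         return (rest << 1) | bit
--     return go(arr, 0)
-- ===== Notes on version B (the rewrite author's own statement) =====
-- stated objective: alternative
-- what changed: Replaces A's 32-entry bit-count table (one pass filling it, a second pass reading it) by a recursion on bit depth: count the lowest bits of the current array, halve every number, recurse on the halved array, and assemble the answer back-to-front as (rest << 1) | bit.
import Mathlib
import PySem

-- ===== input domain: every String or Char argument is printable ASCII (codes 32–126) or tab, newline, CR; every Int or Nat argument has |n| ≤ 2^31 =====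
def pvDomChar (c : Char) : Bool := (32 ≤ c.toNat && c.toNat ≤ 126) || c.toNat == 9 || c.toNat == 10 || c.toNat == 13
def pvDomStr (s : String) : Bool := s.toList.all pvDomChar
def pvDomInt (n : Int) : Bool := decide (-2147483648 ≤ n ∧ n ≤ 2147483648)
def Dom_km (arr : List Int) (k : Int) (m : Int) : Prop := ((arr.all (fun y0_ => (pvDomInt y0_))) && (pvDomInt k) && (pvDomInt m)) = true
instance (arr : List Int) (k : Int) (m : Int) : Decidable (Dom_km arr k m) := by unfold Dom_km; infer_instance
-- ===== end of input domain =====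

-- B replaces A's table-then-read scheme by a recursion on bit depth: count the lowest
-- bits, halve every number, recurse, and assemble the answer back-to-front; objective: alternative.

-- ===== PORT A =====
-- one pass over arr filling a 32-entry per-bit count table, then a second pass that
-- takes each entry mod m in place and or-s the bit into ans when nonzero
def km (arr : List Int) (k : Int) (m : Int) : Int :=
  let ast : List Int := List.replicate 32 0
  let ast := arr.foldl (fun ast num =>
      (List.range 32).foldl
        (fun ast i => ast.set i (ast.getD i 0 + PySem.Int.band (num >>> i) 1)) ast) ast
  let res := (List.range 32).foldl
      (fun (p : List Int × Int) i =>
        let ast := p.1.set i (PySem.Int.mod (p.1.getD i 0) m)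
        (ast, if ast.getD i 0 ≠ 0 then PySem.Int.bor p.2 ((1 : Int) <<< i) else p.2))
      (ast, 0)
  res.2

-- ===== PORT B =====
-- Source B's go(nums, depth) recurses until depth == 32; here the structural fuel counts the
-- remaining levels, fuel = 32 - depth, so go(nums, depth) is kmGo m nums (32 - depth)
def kmGo (m : Int) (nums : List Int) : Nat → Int
  | 0 => 0
  | fuel + 1 =>
    let c := nums.foldl (fun c x => c + PySem.Int.band x 1) 0
    let rest := kmGo m (nums.map (fun (x : Int) => x >>> (1 : Nat))) fuel
    let bit : Int := if PySem.Int.mod c m ≠ 0 then 1 else 0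
    PySem.Int.bor (rest <<< (1 : Nat)) bit

def km_alt (arr : List Int) (k : Int) (m : Int) : Int := kmGo m arr 32

-- ===== PRECONDITION & SPEC =====
-- Pre_ excludes only m = 0, on which A (and B) raise ZeroDivisionError at the '% m'.
def Pre_km (arr : List Int) (k : Int) (m : Int) : Prop := m ≠ 0
instance (arr : List Int) (k : Int) (m : Int) : Decidable (Pre_km arr k m) := by unfold Pre_km; infer_instance
def pvWitness_km : List Int × Int × Int := ([5, 5, 7, 7, 7], 2, 3)
def Spec_km (arr : List Int) (k : Int) (m : Int) (out : Int) : Prop := out = km_alt arr k m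
instance (arr : List Int) (k : Int) (m : Int) (out : Int) : Decidable (Spec_km arr k m out) := by unfold Spec_km; infer_instance

-- ===== CLAIM (what is proved, stated in full; the proofs are below) =====
def Claim_equal_km : Prop := ∀ (arr : List Int) (k : Int) (m : Int), Dom_km arr k m → Pre_km arr k m → Spec_km arr k m (km arr k m)

-- ===== LEMMAS AND PROOFS =====

-- the per-bit sum both programs are ultimately counting
def pvBitSum (arr : List Int) (i : Nat) : Int :=
  arr.foldl (fun c (num : Int) => c + PySem.Int.band (num >>> i) 1) 0

-- the common value: sum over the first n bit positions of 2^i where the count is ≢ 0 mod m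
def pvSum (arr : List Int) (m : Int) (n : Nat) : Int :=
  ∑ i ∈ Finset.range n, (if PySem.Int.mod (pvBitSum arr i) m ≠ 0 then (2:Int)^i else 0)

theorem pvBitSum_from (arr : List Int) (i : Nat) (c : Int) :
    arr.foldl (fun c (num : Int) => c + PySem.Int.band (num >>> i) 1) c = c + pvBitSum arr i := by
  induction arr generalizing c with
  | nil => simp [pvBitSum]
  | cons x xs ih =>
      simp only [pvBitSum, List.foldl_cons] at *
      rw [ih, ih (0 + PySem.Int.band (x >>> i) 1)]; ring

theorem pvBitSum_cons (x : Int) (xs : List Int) (i : Nat) :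
    pvBitSum (x :: xs) i = PySem.Int.band (x >>> i) 1 + pvBitSum xs i := by
  rw [show pvBitSum (x :: xs) i
      = xs.foldl (fun c (num : Int) => c + PySem.Int.band (num >>> i) 1)
          (0 + PySem.Int.band (x >>> i) 1) from rfl, pvBitSum_from]
  ring

-- A's inner loop over range n adds num's bits pointwise (capped at n)
theorem pv_inner_map (num : Int) (n : Nat) (ast : List Int) :
    (List.range n).foldl
      (fun ast i => ast.set i (ast.getD i 0 + PySem.Int.band (num >>> i) 1)) ast
    = ast.mapIdx (fun j x => if j < n then x + PySem.Int.band (num >>> j) 1 else x) := by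
  induction n with
  | zero =>
      simp only [List.range_zero, List.foldl_nil]
      apply List.ext_getElem <;> simp
  | succ n ih =>
      rw [List.range_succ, List.foldl_append, ih]
      apply List.ext_getElem
      · simp
      · intro j h1 h2
        simp only [List.foldl_cons, List.foldl_nil, List.length_set, List.length_mapIdx] at h2
        simp only [List.foldl_cons, List.foldl_nil]
        rw [List.getElem_set]
        by_cases hj : n = j
        · subst hj
          have hn : n < (ast.mapIdx fun j x => if j < n then x + PySem.Int.band (num >>> j) 1 else x).length := by
            simpa using h2
          simp only [if_pos rfl, List.getD, List.getElem?_eq_getElem hn, Option.getD_some,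
            List.getElem_mapIdx, lt_irrefl, if_neg (lt_irrefl n), if_pos (Nat.lt_succ_self n)]
          simp
        · simp only [if_neg hj, List.getElem_mapIdx]
          by_cases hlt : j < n
          · simp [hlt, Nat.lt_succ_of_lt hlt]
          · have : ¬ j < n + 1 := by omega
            simp [hlt, this]

-- A's outer loop: final table entry i (i < length) is initial entry plus the per-bit sum
theorem pv_outer_getD (arr : List Int) (ast : List Int) (i : Nat) (hi : i < ast.length) :
    (arr.foldl (fun ast num =>
        (List.range 32).foldl
          (fun ast i => ast.set i (ast.getD i 0 + PySem.Int.band (num >>> i) 1)) ast) ast).getD i 0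
    = ast.getD i 0 + (if i < 32 then pvBitSum arr i else 0) := by
  induction arr generalizing ast with
  | nil => simp [pvBitSum]
  | cons x xs ih =>
      simp only [List.foldl_cons]
      rw [pv_inner_map, ih _ (by simpa using hi)]
      have hread : (ast.mapIdx (fun j y => if j < 32 then y + PySem.Int.band (x >>> j) 1 else y)).getD i 0
          = (if i < 32 then ast.getD i 0 + PySem.Int.band (x >>> i) 1 else ast.getD i 0) := by
        have hi' : i < (ast.mapIdx fun j y => if j < 32 then y + PySem.Int.band (x >>> j) 1 else y).length := by
          simpa using hi
        rw [List.getD, List.getElem?_eq_getElem hi', Option.getD_some, List.getElem_mapIdx,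
          List.getD, List.getElem?_eq_getElem hi, Option.getD_some]
      rw [hread]
      by_cases h32 : i < 32
      · simp only [if_pos h32, pvBitSum_cons]; ring
      · simp [h32]

-- A's second loop: the ans component only depends on the initial table reads
theorem pv_second_loop (m : Int) (n : Nat) (ast : List Int) (ans : Int) :
    ((List.range n).foldl
      (fun (p : List Int × Int) i =>
        let ast := p.1.set i (PySem.Int.mod (p.1.getD i 0) m)
        (ast, if ast.getD i 0 ≠ 0 then PySem.Int.bor p.2 ((1 : Int) <<< i) else p.2))
      (ast, ans)).1
      = ast.mapIdx (fun j x => if j < n then PySem.Int.mod x m else x)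
    ∧ ((List.range n).foldl
      (fun (p : List Int × Int) i =>
        let ast := p.1.set i (PySem.Int.mod (p.1.getD i 0) m)
        (ast, if ast.getD i 0 ≠ 0 then PySem.Int.bor p.2 ((1 : Int) <<< i) else p.2))
      (ast, ans)).2
      = (List.range n).foldl
          (fun ans i =>
            if PySem.Int.mod (ast.getD i 0) m ≠ 0 then PySem.Int.bor ans ((1 : Int) <<< i) else ans)
          ans := by
  induction n with
  | zero =>
      constructor
      · simp only [List.range_zero, List.foldl_nil]
        apply List.ext_getElem <;> simp
      · simp
  | succ n ih =>
      obtain ⟨ih1, ih2⟩ := ih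
      have hc : ((ast.mapIdx fun j x => if j < n then PySem.Int.mod x m else x).set n
          (PySem.Int.mod ((ast.mapIdx fun j x => if j < n then PySem.Int.mod x m else x).getD n 0) m)).getD n 0
          = if n < ast.length then PySem.Int.mod (ast.getD n 0) m else 0 := by
        by_cases hn : n < ast.length
        · have hn' : n < (ast.mapIdx fun j x => if j < n then PySem.Int.mod x m else x).length := by
            simpa using hn
          have hns : n < ((ast.mapIdx fun j x => if j < n then PySem.Int.mod x m else x).set n
              (PySem.Int.mod ((ast.mapIdx fun j x => if j < n then PySem.Int.mod x m else x).getD n 0) m)).length := by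
            simpa using hn
          rw [List.getD, List.getElem?_eq_getElem hns, Option.getD_some, List.getElem_set,
            if_pos rfl, List.getD, List.getElem?_eq_getElem hn', Option.getD_some,
            List.getElem_mapIdx, if_neg (lt_irrefl n), if_pos hn, List.getD,
            List.getElem?_eq_getElem hn, Option.getD_some]
        · have hge : ast.length ≤ n := by omega
          have h0 : ((ast.mapIdx fun j x => if j < n then PySem.Int.mod x m else x).set n
              (PySem.Int.mod ((ast.mapIdx fun j x => if j < n then PySem.Int.mod x m else x).getD n 0) m)).length ≤ n := by
            simpa using hge
          rw [List.getD, List.getElem?_eq_none_iff.mpr h0, Option.getD_none, if_neg hn]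
      constructor
      · rw [List.range_succ, List.foldl_append, List.foldl_cons, List.foldl_nil]
        dsimp only
        rw [ih1]
        apply List.ext_getElem
        · simp
        · intro j h1 h2
          simp only [List.length_set, List.length_mapIdx] at h2
          rw [List.getElem_set]
          by_cases hj : n = j
          · subst hj
            have hn' : n < (ast.mapIdx fun j x => if j < n then PySem.Int.mod x m else x).length := by
              simpa using h2
            rw [if_pos rfl, List.getD, List.getElem?_eq_getElem hn', Option.getD_some,
              List.getElem_mapIdx, if_neg (lt_irrefl n), List.getElem_mapIdx,
              if_pos (Nat.lt_succ_self n)]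
          · simp only [if_neg hj, List.getElem_mapIdx]
            by_cases hlt : j < n
            · simp [hlt, Nat.lt_succ_of_lt hlt]
            · have : ¬ j < n + 1 := by omega
              simp [hlt, this]
      · rw [List.range_succ, List.foldl_append, List.foldl_append, List.foldl_cons,
          List.foldl_nil, List.foldl_cons, List.foldl_nil]
        dsimp only
        rw [ih1, ih2, hc]
        by_cases hn : n < ast.length
        · rw [if_pos hn]
        · rw [if_neg hn]
          have h0 : ast[n]? = none := List.getElem?_eq_none_iff.mpr (by omega)
          simp [List.getD, h0, PySem.Int.mod, Int.zero_fmod]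

-- ---- common-value bridge lemmas ----

theorem pvSum_nonneg (arr : List Int) (m : Int) (n : Nat) : 0 ≤ pvSum arr m n := by
  unfold pvSum
  apply Finset.sum_nonneg
  intro i _
  split_ifs with h
  · positivity
  · exact le_refl 0

theorem pvSum_lt (arr : List Int) (m : Int) (n : Nat) : pvSum arr m n < 2 ^ n := by
  induction n with
  | zero => simp [pvSum]
  | succ n ih =>
      unfold pvSum at *
      rw [Finset.sum_range_succ]
      have h2 : (if PySem.Int.mod (pvBitSum arr n) m ≠ 0 then (2:Int)^n else 0) ≤ 2^n := by
        split_ifs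
        · exact le_refl _
        · positivity
      calc _ ≤ (∑ i ∈ Finset.range n, (if PySem.Int.mod (pvBitSum arr i) m ≠ 0 then (2:Int)^i else 0)) + 2^n := by linarith
        _ < 2^n + 2^n := by linarith
        _ = 2^(n+1) := by ring

-- bor of a value below 2^n with the bit 2^n just adds it
theorem pv_bor_pow (a : Int) (n : Nat) (h0 : 0 ≤ a) (h : a < 2 ^ n) :
    PySem.Int.bor a ((1 : Int) <<< n) = a + 2 ^ n := by
  obtain ⟨a', rfl⟩ := Int.eq_ofNat_of_zero_le h0
  have hs : (1 : Int) <<< n = ((2 ^ n : Nat) : Int) := by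
    rw [Int.shiftLeft_eq]; push_cast; ring
  have ha : a' < 2 ^ n := by exact_mod_cast h
  rw [hs, PySem.Int.bor_natCast]
  have := Nat.two_pow_add_eq_or_of_lt (i := n) (b := a') ha 1
  rw [mul_one] at this
  rw [Nat.lor_comm, ← this]
  push_cast; ring

-- bor of a left-shifted nonnegative with a 0/1 bit just adds the bit
theorem pv_bor_bit (x b : Int) (hx : 0 ≤ x) (hb : b = 0 ∨ b = 1) :
    PySem.Int.bor (x <<< (1 : Nat)) b = 2 * x + b := by
  obtain ⟨x', rfl⟩ := Int.eq_ofNat_of_zero_le hx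
  have hs : ((x' : Int)) <<< (1 : Nat) = ((2 * x' : Nat) : Int) := by
    rw [Int.shiftLeft_eq]; push_cast; ring
  rcases hb with rfl | rfl
  · simp [hs]
  · rw [hs, show (1:Int) = ((1:Nat):Int) from rfl, PySem.Int.bor_natCast]
    have := Nat.two_pow_add_eq_or_of_lt (i := 1) (b := 1) (by norm_num) x'
    rw [pow_one] at this
    rw [← this]
    push_cast; ring

-- shifting every number right by one moves the per-bit sums down by one position
theorem pvBitSum_shift (nums : List Int) (i : Nat) :
    pvBitSum (nums.map (fun (x : Int) => x >>> (1 : Nat))) i = pvBitSum nums (i + 1) := by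
  unfold pvBitSum
  rw [List.foldl_map]
  congr 1
  funext c x
  rw [← Int.shiftRight_add, Nat.add_comm]

-- B's recursion computes pvSum: fuel levels give exactly the low `fuel` bit positions
theorem kmGo_eq (m : Int) (fuel : Nat) (nums : List Int) :
    kmGo m nums fuel = pvSum nums m fuel := by
  induction fuel generalizing nums with
  | zero => simp [kmGo, pvSum]
  | succ n ih =>
      show PySem.Int.bor (kmGo m (nums.map (fun (x : Int) => x >>> (1:Nat))) n <<< (1:Nat))
          (if PySem.Int.mod (nums.foldl (fun c x => c + PySem.Int.band x 1) 0) m ≠ 0 then 1 else 0)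
        = pvSum nums m (n + 1)
      rw [ih]
      have hc : nums.foldl (fun c x => c + PySem.Int.band x 1) 0 = pvBitSum nums 0 := by
        unfold pvBitSum
        congr 1
        funext c x
        rw [Int.shiftRight_zero]
      rw [pv_bor_bit _ _ (pvSum_nonneg _ _ _) (by split_ifs <;> simp)]
      have hshift : pvSum (nums.map (fun (x : Int) => x >>> (1 : Nat))) m n
          = ∑ i ∈ Finset.range n, (if PySem.Int.mod (pvBitSum nums (i+1)) m ≠ 0 then (2:Int)^i else 0) := by
        unfold pvSum
        apply Finset.sum_congr rfl
        intro i _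
        rw [pvBitSum_shift]
      rw [hshift, hc]
      unfold pvSum
      rw [Finset.sum_range_succ', Finset.mul_sum]
      congr 1
      · apply Finset.sum_congr rfl
        intro i _
        split_ifs <;> ring
-- A's answer fold computes pvSum too
theorem pv_fold_eq_pvSum (arr : List Int) (m : Int) (n : Nat) :
    (List.range n).foldl
      (fun ans i =>
        if PySem.Int.mod (pvBitSum arr i) m ≠ 0 then PySem.Int.bor ans ((1 : Int) <<< i) else ans) 0
    = pvSum arr m n := by
  induction n with
  | zero => simp [pvSum]
  | succ n ih =>
      rw [List.range_succ, List.foldl_append, List.foldl_cons, List.foldl_nil, ih]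
      show (if PySem.Int.mod (pvBitSum arr n) m ≠ 0
          then PySem.Int.bor (pvSum arr m n) ((1 : Int) <<< n) else pvSum arr m n) = pvSum arr m (n+1)
      rw [show pvSum arr m (n+1) = pvSum arr m n
            + (if PySem.Int.mod (pvBitSum arr n) m ≠ 0 then (2:Int)^n else 0) from by
          unfold pvSum; rw [Finset.sum_range_succ]]
      split_ifs with h
      · rw [pv_bor_pow _ _ (pvSum_nonneg _ _ _) (pvSum_lt _ _ _)]
      · ring

-- ===== VERDICT (by name: the statement is the Claim_ definition above) =====
theorem km_spec : Claim_equal_km := by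
  intro arr k m _ _
  show km arr k m = km_alt arr k m
  unfold km km_alt
  rw [(pv_second_loop m 32 _ 0).2, kmGo_eq]
  rw [← pv_fold_eq_pvSum arr m 32]
  apply PySem.List.foldl_congr_mem
  intro ans i hi
  have hi32 : i < 32 := List.mem_range.mp hi
  have hget : (arr.foldl (fun ast num =>
      (List.range 32).foldl
        (fun ast i => ast.set i (ast.getD i 0 + PySem.Int.band (num >>> i) 1)) ast)
      (List.replicate 32 (0 : Int))).getD i 0 = pvBitSum arr i := by
    rw [pv_outer_getD arr _ i (by simpa using hi32)]
    have : (List.replicate 32 (0 : Int)).getD i 0 = 0 := by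
      rw [List.getD, List.getElem?_replicate]
      simp [hi32]
    rw [this, if_pos hi32, zero_add]
  rw [hget]
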